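-- pv_equiv track=rewrite | github.com/abhaybansal16/Colossus | main.py | encode_rot47
-- ===== SOURCE A (Python) =====
-- def encode_rot47(text, key=None):
--     result = ""
--     for char in text:
--         char_ord = ord(char)
--         if 33 <= char_ord <= 126:
--             result += chr(33 + ((char_ord - 33 + 47) % 94))
--         else:
--             result += char
--     return result
-- ===== SOURCE B (Python) =====
-- def encode_rot47(text, key=None):
--     printable = [chr(i) for i in range(33, 127)]
--     mapping = dict(zip(printable, printable[47:] + printable[:47]))
--     return "".join(mapping.get(c, c) for c in text)
-- ===== Notes on version B (the rewrite author's own statement) =====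
-- stated objective: alternative
-- what changed: B never does per-character modulo arithmetic: it writes out the printable alphabet once, forms its 47-rotation by list slicing and concatenation, zips the two into a mapping dict, and renders the text with lookups (dict.get with the char itself as default).
import Mathlib
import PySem

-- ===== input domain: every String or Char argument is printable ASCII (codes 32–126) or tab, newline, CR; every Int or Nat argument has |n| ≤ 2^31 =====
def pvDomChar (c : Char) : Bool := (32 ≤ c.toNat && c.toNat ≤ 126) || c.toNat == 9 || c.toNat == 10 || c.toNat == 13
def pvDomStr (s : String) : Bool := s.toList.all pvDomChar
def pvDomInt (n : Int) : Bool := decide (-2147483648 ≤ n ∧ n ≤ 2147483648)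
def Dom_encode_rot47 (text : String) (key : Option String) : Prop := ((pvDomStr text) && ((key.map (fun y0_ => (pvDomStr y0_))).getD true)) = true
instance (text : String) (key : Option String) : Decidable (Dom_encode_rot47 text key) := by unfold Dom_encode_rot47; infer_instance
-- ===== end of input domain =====

-- B replaces A's per-char modulo arithmetic by a mapping built once from the printable alphabet rotated by slicing; same O(n) cost (alternative).
-- ===== PORT A =====
-- per-char step of A's loop body: rotate printable chars 33..126, keep others
def rot47StepA (c : Char) : Char :=
  let char_ord : Int := (c.toNat : Int)
  if 33 ≤ char_ord ∧ char_ord ≤ 126 then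
    Char.ofNat (33 + PySem.Int.mod (char_ord - 33 + 47) 94).toNat
  else c

def encode_rot47 (text : String) (key : Option String) : String :=
  String.mk (text.toList.foldl (fun result c => result ++ [rot47StepA c]) [])

-- ===== PORT B =====
-- printable = [chr(i) for i in range(33, 127)]
def rot47Printable : List Char :=
  (PySem.List.pyRange 33 127 1).map (fun i => Char.ofNat i.toNat)

-- mapping = dict(zip(printable, printable[47:] + printable[:47]))
def rot47Mapping : PySem.Dict Char Char :=
  PySem.Dict.ofList
    (rot47Printable.zip
      (PySem.List.slice rot47Printable (some 47) none
        ++ PySem.List.slice rot47Printable none (some 47)))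

-- "".join(mapping.get(c, c) for c in text)
def encode_rot47_alt (text : String) (key : Option String) : String :=
  String.mk (text.toList.map (fun c => rot47Mapping.getD c c))

-- ===== PRECONDITION & SPEC =====
def Spec_encode_rot47 (text : String) (key : Option String) (out : String) : Prop := out = encode_rot47_alt text key
instance (text : String) (key : Option String) (out : String) : Decidable (Spec_encode_rot47 text key out) := by unfold Spec_encode_rot47; infer_instance

-- ===== CLAIM =====
def Claim_equal_encode_rot47 : Prop := ∀ (text : String) (key : Option String), Dom_encode_rot47 text key → Spec_encode_rot47 text key (encode_rot47 text key)

-- ===== LEMMAS AND PROOFS =====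
-- B's mapping lookup agrees with A's per-char step on every code below 128 (all of Dom)
set_option maxRecDepth 16384 in
lemma rot47Mapping_getD : ∀ (n : Fin 128),
    rot47Mapping.getD (Char.ofNat n) (Char.ofNat n) = rot47StepA (Char.ofNat n) := by decide

lemma step_eq (c : Char) (h : c.toNat < 128) :
    rot47Mapping.getD c c = rot47StepA c := by
  have := rot47Mapping_getD ⟨c.toNat, h⟩
  simpa [Char.ofNat_toNat] using this

lemma dom_char_lt (c : Char) (h : pvDomChar c = true) : c.toNat < 128 := by
  simp [pvDomChar] at h; omega

-- ===== VERDICT =====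
set_option maxRecDepth 16384 in
theorem encode_rot47_spec : Claim_equal_encode_rot47 := by
  intro text key hdom
  unfold Spec_encode_rot47 encode_rot47 encode_rot47_alt
  rw [PySem.List.foldl_append_singleton_eq_map]
  have hall : ∀ c ∈ text.toList, pvDomChar c = true := by
    have : pvDomStr text = true := by
      unfold Dom_encode_rot47 at hdom
      exact (Bool.and_eq_true _ _ |>.mp hdom).1
    simpa [pvDomStr, List.all_eq_true] using this
  congr 1
  apply List.map_congr_left
  intro c hc
  exact (step_eq c (dom_char_lt c (hall c hc))).symm
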